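-- pv_equiv track=rewrite | github.com/SynapseWeb/recon-cropper | funs/helpers.py | fillInBounds
-- ===== SOURCE A (Python) =====
-- def fillInBounds(bounds_dict):
--     """Fills in bounds data where object doesn't exist with bounds data from previous sections."""
--
--     # if the first section(s) do not have the object, then fill it in with first object instance
--     firstInstanceFound = False
--     prevBounds = None
--     for bounds in bounds_dict:
--         if bounds_dict[bounds] != None and not firstInstanceFound:
--             prevBounds = bounds_dict[bounds]
--             firstInstanceFound = True
--
--     # set any bounds points that are None to the previous bounds
--     for bounds in bounds_dict:
--         if bounds_dict[bounds] == None: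
--             bounds_dict[bounds] = prevBounds
--         prevBounds = bounds_dict[bounds]
--
--     return bounds_dict
-- ===== SOURCE B (Python) =====
-- def fillInBounds(bounds_dict):
--     """Fills in bounds data where object doesn't exist with bounds data from previous sections."""
--     # forward pass: fill each None with the nearest preceding bounds
--     prev = None
--     for k in bounds_dict:
--         if bounds_dict[k] == None:
--             bounds_dict[k] = prev
--         else:
--             prev = bounds_dict[k]
--     # backward pass: any still-None entries (the leading block) get the nearest following bounds
--     nxt = None
--     for k in reversed(list(bounds_dict)):
--         if bounds_dict[k] != None:
--             nxt = bounds_dict[k]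
--         else:
--             bounds_dict[k] = nxt
--     return bounds_dict
-- ===== Notes on version B (the rewrite author's own statement) =====
-- stated objective: alternative
-- what changed: Replaces A's separate first-instance prescan plus a fill loop that rewrites prev at every entry by a forward fill pass (prev kept only from non-None entries) and a backward pass that fills the remaining leading None block from the nearest following bounds. Pre_ only excludes duplicate-key association lists, which have no Python dict counterpart.
import Mathlib
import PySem

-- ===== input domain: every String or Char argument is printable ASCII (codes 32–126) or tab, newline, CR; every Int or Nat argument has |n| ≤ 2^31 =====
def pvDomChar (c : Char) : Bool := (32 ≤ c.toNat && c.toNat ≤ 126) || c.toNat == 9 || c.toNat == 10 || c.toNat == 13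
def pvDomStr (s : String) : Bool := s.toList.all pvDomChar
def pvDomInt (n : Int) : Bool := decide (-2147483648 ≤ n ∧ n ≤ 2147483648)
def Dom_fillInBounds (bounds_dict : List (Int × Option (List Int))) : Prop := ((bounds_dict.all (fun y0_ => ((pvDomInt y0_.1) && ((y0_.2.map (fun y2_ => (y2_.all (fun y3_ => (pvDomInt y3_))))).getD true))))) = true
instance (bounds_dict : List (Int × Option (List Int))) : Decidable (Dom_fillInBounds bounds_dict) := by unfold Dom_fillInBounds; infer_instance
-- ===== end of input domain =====

-- B replaces A's first-instance prescan + fill loop by a forward fill pass and a backward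
-- pass for the leading None block (alternative decomposition, same O(n) cost).
-- Both Pythons mutate the dict in place; the equivalence proved is about the return value.

-- ===== PORT A =====
-- first loop of A: foldl over the entries with state (firstInstanceFound, prevBounds)
def fillA_scan (bounds_dict : List (Int × Option (List Int))) : Bool × Option (List Int) :=
  bounds_dict.foldl
    (fun s kv => if kv.2 ≠ none ∧ s.1 = false then (true, kv.2) else s)
    (false, none)

-- second loop of A: fill a None entry with prevBounds, then set prevBounds to the entry's value
def fillA_loop (prevBounds : Option (List Int)) :
    List (Int × Option (List Int)) → List (Int × Option (List Int))
  | [] => []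
  | (k, v) :: rest =>
      let v' := if v = none then prevBounds else v
      (k, v') :: fillA_loop v' rest

def fillInBounds (bounds_dict : List (Int × Option (List Int))) : List (Int × Option (List Int)) :=
  let s := fillA_scan bounds_dict
  fillA_loop s.2 bounds_dict

-- ===== PORT B =====
-- forward pass: a None entry becomes prev (prev unchanged), a non-None entry updates prev
def fillB_fwd (prev : Option (List Int)) :
    List (Int × Option (List Int)) → List (Int × Option (List Int))
  | [] => []
  | (k, v) :: rest =>
      if v = none then (k, prev) :: fillB_fwd prev rest
      else (k, v) :: fillB_fwd v rest

-- backward pass, written over the reversed list: a non-None entry updates nxt,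
-- a None entry becomes nxt
def fillB_bwd (nxt : Option (List Int)) :
    List (Int × Option (List Int)) → List (Int × Option (List Int))
  | [] => []
  | (k, v) :: rest =>
      if v ≠ none then (k, v) :: fillB_bwd v rest
      else (k, nxt) :: fillB_bwd nxt rest

def fillInBounds_alt (bounds_dict : List (Int × Option (List Int))) : List (Int × Option (List Int)) :=
  (fillB_bwd none (fillB_fwd none bounds_dict).reverse).reverse

-- ===== PRECONDITION & SPEC =====
-- Pre_ excludes association lists with duplicate keys: those collapse when read as a
-- Python dict, so the list-level reading of the dict is ambiguous there.
def Pre_fillInBounds (bounds_dict : List (Int × Option (List Int))) : Prop :=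
  (bounds_dict.map Prod.fst).Nodup
instance (bounds_dict : List (Int × Option (List Int))) : Decidable (Pre_fillInBounds bounds_dict) := by unfold Pre_fillInBounds; infer_instance

def pvWitness_fillInBounds : (List (Int × Option (List Int))) :=
  [(0, none), (1, some [1, 2]), (2, none), (3, some [4])]

def Spec_fillInBounds (bounds_dict : List (Int × Option (List Int))) (out : List (Int × Option (List Int))) : Prop := out = fillInBounds_alt bounds_dict
instance (bounds_dict : List (Int × Option (List Int))) (out : List (Int × Option (List Int))) : Decidable (Spec_fillInBounds bounds_dict out) := by unfold Spec_fillInBounds; infer_instance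

-- ===== CLAIM (what is proved, stated in full; the proofs are below) =====
def Claim_equal_fillInBounds : Prop := ∀ (bounds_dict : List (Int × Option (List Int))), Dom_fillInBounds bounds_dict → Pre_fillInBounds bounds_dict → Spec_fillInBounds bounds_dict (fillInBounds bounds_dict)

-- ===== LEMMAS AND PROOFS =====

-- first value ≠ none in the list, else none (what A's scan computes)
def firstNN : List (Int × Option (List Int)) → Option (List Int)
  | [] => none
  | (_, v) :: t => if v = none then firstNN t else v

-- nxt after fillB_bwd has threaded through l, starting from n
def lastNN (n : Option (List Int)) : List (Int × Option (List Int)) → Option (List Int)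
  | [] => n
  | (_, v) :: t => lastNN (if v = none then n else v) t

theorem scan_found (p : List Int) (l : List (Int × Option (List Int))) :
    l.foldl (fun s kv => if kv.2 ≠ none ∧ s.1 = false then (true, kv.2) else s) (true, some p)
      = (true, some p) := by
  induction l with
  | nil => rfl
  | cons h t ih => simpa [List.foldl] using ih

theorem scan_eq_firstNN (l : List (Int × Option (List Int))) :
    fillA_scan l = (if firstNN l = none then (false, none) else (true, firstNN l)) := by
  induction l with
  | nil => rfl
  | cons h t ih =>
    obtain ⟨k, v⟩ := h
    cases v with
    | none => simpa [fillA_scan, List.foldl, firstNN] using ih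
    | some p => simp [fillA_scan, List.foldl, firstNN, scan_found]

theorem fillA_eq_fwd (p : Option (List Int)) (l : List (Int × Option (List Int))) :
    fillA_loop p l = fillB_fwd p l := by
  induction l generalizing p with
  | nil => rfl
  | cons h t ih =>
    obtain ⟨k, v⟩ := h
    cases v with
    | none => simp [fillA_loop, fillB_fwd, ih]
    | some q => simp [fillA_loop, fillB_fwd, ih]

theorem bwd_append (n : Option (List Int)) (l1 l2 : List (Int × Option (List Int))) :
    fillB_bwd n (l1 ++ l2) = fillB_bwd n l1 ++ fillB_bwd (lastNN n l1) l2 := by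
  induction l1 generalizing n with
  | nil => simp [fillB_bwd, lastNN]
  | cons h t ih =>
    obtain ⟨k, v⟩ := h
    cases v with
    | none => simp [fillB_bwd, lastNN, ih]
    | some q => simp [fillB_bwd, lastNN, ih]

theorem lastNN_append (n : Option (List Int)) (l1 l2 : List (Int × Option (List Int))) :
    lastNN n (l1 ++ l2) = lastNN (lastNN n l1) l2 := by
  induction l1 generalizing n with
  | nil => simp [lastNN]
  | cons h t ih =>
    obtain ⟨k, v⟩ := h
    simp [lastNN, ih]

theorem lastNN_reverse (n : Option (List Int)) (l : List (Int × Option (List Int))) :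
    lastNN n l.reverse = (if firstNN l = none then n else firstNN l) := by
  induction l generalizing n with
  | nil => simp [lastNN, firstNN]
  | cons h t ih =>
    obtain ⟨k, v⟩ := h
    cases v with
    | none => simp [firstNN, lastNN_append, lastNN, ih]
    | some q =>
      simp [firstNN, lastNN_append, lastNN]

theorem firstNN_fwd_none (l : List (Int × Option (List Int))) :
    firstNN (fillB_fwd none l) = firstNN l := by
  induction l with
  | nil => rfl
  | cons h t ih =>
    obtain ⟨k, v⟩ := h
    cases v with
    | none => simpa [fillB_fwd, firstNN] using ih
    | some q => simp [fillB_fwd, firstNN]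

-- once prev is non-None, the forward pass fills everything: the backward pass is the identity
theorem bwd_fwd_some (p : List Int) (n : Option (List Int)) (l : List (Int × Option (List Int))) :
    fillB_bwd n (fillB_fwd (some p) l).reverse = (fillB_fwd (some p) l).reverse := by
  induction l generalizing p n with
  | nil => rfl
  | cons h t ih =>
    obtain ⟨k, v⟩ := h
    have step : ∀ r, fillB_bwd n ((fillB_fwd (some r) t).reverse ++ [(k, some r)])
        = (fillB_fwd (some r) t).reverse ++ [(k, some r)] := by
      intro r
      rw [bwd_append, ih r]
      simp [fillB_bwd]
    cases v with
    | none => simpa [fillB_fwd] using step p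
    | some q => simpa [fillB_fwd] using step q

theorem main_eq (l : List (Int × Option (List Int))) :
    fillB_fwd (firstNN l) l = (fillB_bwd none (fillB_fwd none l).reverse).reverse := by
  induction l with
  | nil => rfl
  | cons h t ih =>
    obtain ⟨k, v⟩ := h
    cases v with
    | none =>
      have hx : lastNN none (fillB_fwd none t).reverse = firstNN t := by
        rw [lastNN_reverse, firstNN_fwd_none]
        split <;> simp_all
      simp only [firstNN, fillB_fwd, reduceIte, List.reverse_cons, bwd_append, hx]
      simp [fillB_bwd, ← ih]
    | some q =>
      have h1 := bwd_fwd_some q none t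
      simp [fillB_fwd, bwd_append, h1, fillB_bwd]

-- ===== VERDICT (by name: the statement is the Claim_ definition above) =====
theorem fillInBounds_spec : Claim_equal_fillInBounds := by
  intro bd _ _
  show fillInBounds bd = fillInBounds_alt bd
  unfold fillInBounds fillInBounds_alt
  rw [scan_eq_firstNN, fillA_eq_fwd]
  by_cases h : firstNN bd = none
  · rw [if_pos h]
    have hm := main_eq bd
    rw [h] at hm
    exact hm
  · rw [if_neg h]
    exact main_eq bd
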